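-- pv_equiv track=rewrite | github.com/Samsonboadi/NLP-QGIS | nlp_qgis/nlp_engine/__init__.py | _match_layer_name
-- ===== SOURCE A (Python) =====
-- from typing import Dict, Any, List, Optional, Tuple
--
-- def _match_layer_name(mentioned_name: str, active_layers: List[str]) -> Optional[str]:
--     """
--     Match a mentioned layer name to actual active layers.
--     Implements WBSO Block 1: Ambiguity resolution in GIS context
--     """
--     mentioned_lower = mentioned_name.lower()
--
--     # Exact match first
--     for layer in active_layers:
--         if layer.lower() == mentioned_lower:
--             return layer
--
--     # Partial match
--     for layer in active_layers:
--         if mentioned_lower in layer.lower() or layer.lower() in mentioned_lower: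
--             return layer
--
--     # Token-based matching
--     mentioned_tokens = mentioned_lower.split()
--     for layer in active_layers:
--         layer_tokens = layer.lower().replace('_', ' ').split()
--         if any(token in layer_tokens for token in mentioned_tokens):
--             return layer
--
--     return None
-- ===== SOURCE B (Python) =====
-- def _match_layer_name(mentioned_name, active_layers):
--     ml = mentioned_name.lower()
--     mts = ml.split()
--
--     def level_of(layer):
--         ll = layer.lower()
--         if ll == ml:
--             return 1
--         if ml in ll or ll in ml:
--             return 2
--         if any(t in ll.replace('_', ' ').split() for t in mts):
--             return 3
--         return None
--
--     best = None
--     for layer in active_layers: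
--         lv = level_of(layer)
--         if lv is not None and (best is None or lv < best[0]):
--             best = (lv, layer)
--     return best[1] if best is not None else None
-- ===== Notes on version B (the rewrite author's own statement) =====
-- stated objective: alternative
-- what changed: Replaces A's three sequential scans over the layer list with a single pass that assigns each layer a match level (1 exact, 2 substring, 3 token overlap) and keeps the earliest strictly-best candidate.
import Mathlib
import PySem

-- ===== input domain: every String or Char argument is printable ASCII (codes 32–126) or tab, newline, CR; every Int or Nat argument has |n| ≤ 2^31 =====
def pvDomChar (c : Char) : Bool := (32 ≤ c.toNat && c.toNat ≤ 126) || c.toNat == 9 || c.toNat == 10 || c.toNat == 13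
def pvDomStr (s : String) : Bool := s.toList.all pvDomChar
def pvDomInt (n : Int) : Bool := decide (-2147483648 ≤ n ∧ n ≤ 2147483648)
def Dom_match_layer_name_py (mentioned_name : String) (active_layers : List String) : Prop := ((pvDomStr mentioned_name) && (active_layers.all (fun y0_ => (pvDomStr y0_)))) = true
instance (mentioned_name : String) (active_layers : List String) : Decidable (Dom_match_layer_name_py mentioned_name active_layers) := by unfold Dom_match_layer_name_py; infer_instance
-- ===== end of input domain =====

-- B is a single pass assigning each layer a match level (1 exact, 2 substring, 3 token overlap)
-- and keeping the earliest strictly-best candidate, instead of A's three sequential scans.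

-- ===== PORT A =====
-- Each 'for layer in …: if …: return layer' loop is the obvious first-match scan (List.find?);
-- the local variables mentioned_lower / mentioned_tokens are written inline (same values).
def match_layer_name_py (mentioned_name : String) (active_layers : List String) : Option String :=
  -- Exact match first
  match active_layers.find? (fun layer => PySem.Str.lower layer == PySem.Str.lower mentioned_name) with
  | some layer => some layer
  | none =>
    -- Partial match
    match active_layers.find? (fun layer =>
        PySem.Str.isIn (PySem.Str.lower mentioned_name) (PySem.Str.lower layer) ||
        PySem.Str.isIn (PySem.Str.lower layer) (PySem.Str.lower mentioned_name)) with
    | some layer => some layer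
    | none =>
      -- Token-based matching
      active_layers.find? (fun layer =>
        (PySem.Str.split₀ (PySem.Str.lower mentioned_name)).any (fun token =>
          (PySem.Str.split₀ (PySem.Str.replace (PySem.Str.lower layer) "_" " ")).contains token))

-- ===== PORT B =====
-- level_of from Source B (its local ll = layer.lower() written inline, same value)
def pvLevelOf (ml : String) (mts : List String) (layer : String) : Option Nat :=
  if PySem.Str.lower layer == ml then some 1
  else if PySem.Str.isIn ml (PySem.Str.lower layer) || PySem.Str.isIn (PySem.Str.lower layer) ml then some 2
  else if mts.any (fun token => (PySem.Str.split₀ (PySem.Str.replace (PySem.Str.lower layer) "_" " ")).contains token) then some 3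
  else none

-- one step of Source B's loop: update best only on a strictly lower level
def pvStep (ml : String) (mts : List String) (best : Option (Nat × String)) (layer : String) :
    Option (Nat × String) :=
  match pvLevelOf ml mts layer with
  | none => best
  | some lv =>
    match best with
    | none => some (lv, layer)
    | some b => if lv < b.1 then some (lv, layer) else best

def match_layer_name_py_alt (mentioned_name : String) (active_layers : List String) : Option String :=
  (active_layers.foldl
    (pvStep (PySem.Str.lower mentioned_name) (PySem.Str.split₀ (PySem.Str.lower mentioned_name)))
    none).map (·.2)

-- ===== PRECONDITION & SPEC =====
def Spec_match_layer_name_py (mentioned_name : String) (active_layers : List String) (out : Option String) : Prop := out = match_layer_name_py_alt mentioned_name active_layers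
instance (mentioned_name : String) (active_layers : List String) (out : Option String) : Decidable (Spec_match_layer_name_py mentioned_name active_layers out) := by unfold Spec_match_layer_name_py; infer_instance

-- ===== CLAIM (what is proved, stated in full; the proofs are below) =====
def Claim_equal_match_layer_name_py : Prop := ∀ (mentioned_name : String) (active_layers : List String), Dom_match_layer_name_py mentioned_name active_layers → Spec_match_layer_name_py mentioned_name active_layers (match_layer_name_py mentioned_name active_layers)

-- ===== LEMMAS AND PROOFS =====

-- a returned level is at least 1
theorem pvLevelOf_one_le (ml : String) (mts : List String) (layer : String) (lv : Nat)
    (h : pvLevelOf ml mts layer = some lv) : 1 ≤ lv := by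
  unfold pvLevelOf at h
  split_ifs at h <;> simp_all <;> omega

-- a best of level 1 is never replaced
theorem foldl_step_one (ml : String) (mts : List String) (y : String) (L : List String) :
    L.foldl (pvStep ml mts) (some (1, y)) = some (1, y) := by
  induction L with
  | nil => rfl
  | cons x L ih =>
    have hstep : pvStep ml mts (some (1, y)) x = some (1, y) := by
      unfold pvStep
      cases h : pvLevelOf ml mts x with
      | none => rfl
      | some lv =>
        have := pvLevelOf_one_le ml mts x lv h
        simp [Nat.not_lt.mpr this]
    rw [List.foldl_cons, hstep, ih]

-- a best of level 2 is replaced exactly by the first exact (level-1) match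
theorem foldl_step_two (ml : String) (mts : List String) (y : String) (L : List String) :
    L.foldl (pvStep ml mts) (some (2, y)) =
      match L.find? (fun layer => PySem.Str.lower layer == ml) with
      | some l => some (1, l)
      | none => some (2, y) := by
  induction L with
  | nil => rfl
  | cons x L ih =>
    cases h1 : (PySem.Str.lower x == ml) with
    | true =>
      have hlv : pvLevelOf ml mts x = some 1 := by
        unfold pvLevelOf; rw [if_pos h1]
      have hstep : pvStep ml mts (some (2, y)) x = some (1, x) := by
        unfold pvStep; rw [hlv]; norm_num
      rw [List.foldl_cons, hstep, foldl_step_one,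
        List.find?_cons_of_pos (by exact h1)]
    | false =>
      have hstep : pvStep ml mts (some (2, y)) x = some (2, y) := by
        unfold pvStep pvLevelOf
        rw [if_neg (by simp [h1])]
        split_ifs <;> simp
      rw [List.foldl_cons, hstep, ih,
        List.find?_cons_of_neg (by simp [h1])]

-- a best of level 3 is replaced by the first level-1, else the first level-2, match
theorem foldl_step_three (ml : String) (mts : List String) (y : String) (L : List String) :
    L.foldl (pvStep ml mts) (some (3, y)) =
      match L.find? (fun layer => PySem.Str.lower layer == ml) with
      | some l => some (1, l)
      | none =>
        match L.find? (fun layer =>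
            PySem.Str.isIn ml (PySem.Str.lower layer) ||
            PySem.Str.isIn (PySem.Str.lower layer) ml) with
        | some l => some (2, l)
        | none => some (3, y) := by
  induction L with
  | nil => rfl
  | cons x L ih =>
    cases h1 : (PySem.Str.lower x == ml) with
    | true =>
      have hlv : pvLevelOf ml mts x = some 1 := by
        unfold pvLevelOf; rw [if_pos h1]
      have hstep : pvStep ml mts (some (3, y)) x = some (1, x) := by
        unfold pvStep; rw [hlv]; norm_num
      rw [List.foldl_cons, hstep, foldl_step_one,
        List.find?_cons_of_pos (by exact h1)]
    | false =>
      cases h2 : (PySem.Str.isIn ml (PySem.Str.lower x) || PySem.Str.isIn (PySem.Str.lower x) ml) with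
      | true =>
        have hlv : pvLevelOf ml mts x = some 2 := by
          unfold pvLevelOf; rw [if_neg (by simp [h1]), if_pos h2]
        have hstep : pvStep ml mts (some (3, y)) x = some (2, x) := by
          unfold pvStep; rw [hlv]; norm_num
        rw [List.foldl_cons, hstep, foldl_step_two,
          List.find?_cons_of_neg (by simp [h1]),
          List.find?_cons_of_pos (by exact h2)]
      | false =>
        have hstep : pvStep ml mts (some (3, y)) x = some (3, y) := by
          unfold pvStep pvLevelOf
          rw [if_neg (by simp [h1]), if_neg (by simp only [h2]; decide)]
          split_ifs <;> simp
        rw [List.foldl_cons, hstep, ih,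
          List.find?_cons_of_neg (by simp [h1]),
          List.find?_cons_of_neg (by simp only [h2]; decide)]

-- the full loop from an empty best computes A's three-pass cascade, with levels attached
theorem foldl_step_none (ml : String) (mts : List String) (L : List String) :
    L.foldl (pvStep ml mts) none =
      match L.find? (fun layer => PySem.Str.lower layer == ml) with
      | some l => some (1, l)
      | none =>
        match L.find? (fun layer =>
            PySem.Str.isIn ml (PySem.Str.lower layer) ||
            PySem.Str.isIn (PySem.Str.lower layer) ml) with
        | some l => some (2, l)
        | none =>
          (L.find? (fun layer =>
            mts.any (fun token =>
              (PySem.Str.split₀ (PySem.Str.replace (PySem.Str.lower layer) "_" " ")).contains token))).map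
            (fun l => (3, l)) := by
  induction L with
  | nil => rfl
  | cons x L ih =>
    cases h1 : (PySem.Str.lower x == ml) with
    | true =>
      have hlv : pvLevelOf ml mts x = some 1 := by
        unfold pvLevelOf; rw [if_pos h1]
      have hstep : pvStep ml mts (none : Option (Nat × String)) x = some (1, x) := by
        unfold pvStep; rw [hlv]
      rw [List.foldl_cons, hstep, foldl_step_one,
        List.find?_cons_of_pos (by exact h1)]
    | false =>
      cases h2 : (PySem.Str.isIn ml (PySem.Str.lower x) || PySem.Str.isIn (PySem.Str.lower x) ml) with
      | true =>
        have hlv : pvLevelOf ml mts x = some 2 := by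
          unfold pvLevelOf; rw [if_neg (by simp [h1]), if_pos h2]
        have hstep : pvStep ml mts (none : Option (Nat × String)) x = some (2, x) := by
          unfold pvStep; rw [hlv]
        rw [List.foldl_cons, hstep, foldl_step_two,
          List.find?_cons_of_neg (by simp [h1]),
          List.find?_cons_of_pos (by exact h2)]
      | false =>
        cases h3 : (mts.any (fun token =>
            (PySem.Str.split₀ (PySem.Str.replace (PySem.Str.lower x) "_" " ")).contains token)) with
        | true =>
          have hlv : pvLevelOf ml mts x = some 3 := by
            unfold pvLevelOf; rw [if_neg (by simp [h1]), if_neg (by simp only [h2]; decide), if_pos h3]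
          have hstep : pvStep ml mts (none : Option (Nat × String)) x = some (3, x) := by
            unfold pvStep; rw [hlv]
          rw [List.foldl_cons, hstep, foldl_step_three,
            List.find?_cons_of_neg (by simp [h1]),
            List.find?_cons_of_neg (by simp only [h2]; decide),
            List.find?_cons_of_pos (by exact h3)]
          rfl
        | false =>
          have hlv : pvLevelOf ml mts x = none := by
            unfold pvLevelOf; rw [if_neg (by simp [h1]), if_neg (by simp only [h2]; decide), if_neg (by simp only [h3]; decide)]
          have hstep : pvStep ml mts (none : Option (Nat × String)) x = none := by
            unfold pvStep; rw [hlv]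
          rw [List.foldl_cons, hstep, ih,
            List.find?_cons_of_neg (by simp [h1]),
            List.find?_cons_of_neg (by simp only [h2]; decide),
            List.find?_cons_of_neg (by simp only [h3]; decide)]

-- ===== VERDICT (by name: the statement is the Claim_ definition above) =====
theorem match_layer_name_py_spec : Claim_equal_match_layer_name_py := by
  intro mentioned_name active_layers _
  unfold Spec_match_layer_name_py match_layer_name_py match_layer_name_py_alt
  rw [foldl_step_none]
  cases active_layers.find? (fun layer => PySem.Str.lower layer == PySem.Str.lower mentioned_name) with
  | some l => rfl
  | none =>
    cases active_layers.find? (fun layer =>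
        PySem.Str.isIn (PySem.Str.lower mentioned_name) (PySem.Str.lower layer) ||
        PySem.Str.isIn (PySem.Str.lower layer) (PySem.Str.lower mentioned_name)) with
    | some l => rfl
    | none =>
      cases active_layers.find? (fun layer =>
          (PySem.Str.split₀ (PySem.Str.lower mentioned_name)).any (fun token =>
            (PySem.Str.split₀ (PySem.Str.replace (PySem.Str.lower layer) "_" " ")).contains token)) <;> rfl
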